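-- pv_equiv track=rewrite | github.com/harunardi/dissertation_codes | SRC/XSPROCESS_3D_HEXX.py | convert_hexx
-- ===== SOURCE A (Python) =====
-- def convert_hexx(K_max, J_max, I_max, D):
--     conv_hexx = [0] * (K_max * J_max * I_max)
--     tmp_conv = 0
--     for k in range(K_max):
--         for j in range(J_max):
--             for i in range(I_max):
--                 if D[0][k][j][i] != 0:
--                     tmp_conv += 1
--                     m = k * J_max * I_max + j * I_max + i
--                     conv_hexx[m] = tmp_conv
--
--     return conv_hexx
-- ===== SOURCE B (Python) =====
-- def convert_hexx(K_max, J_max, I_max, D):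
--     # Pass 1: flat 0/1 flags in linear (k,j,i) order.
--     flags = [1 if D[0][k][j][i] != 0 else 0
--              for k in range(K_max)
--              for j in range(J_max)
--              for i in range(I_max)]
--     # Pass 2: inclusive running totals (prefix sums) of the flags.
--     ranks = []
--     total = 0
--     for f in flags:
--         total += f
--         ranks.append(total)
--     # Pass 3: write each nonzero cell's rank into the K*J*I output vector.
--     out = [0] * (K_max * J_max * I_max)
--     for m in range(len(flags)):
--         if flags[m]:
--             out[m] = ranks[m]
--     return out
-- ===== Notes on version B (the rewrite author's own statement) =====
-- stated objective: alternative
-- what changed: The single fused triple-nested scan with a running counter and an index formula is replaced by three flat passes: build a linear 0/1 flags list, compute inclusive prefix sums, then write each nonzero cell's rank into the preallocated output.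
import Mathlib
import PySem

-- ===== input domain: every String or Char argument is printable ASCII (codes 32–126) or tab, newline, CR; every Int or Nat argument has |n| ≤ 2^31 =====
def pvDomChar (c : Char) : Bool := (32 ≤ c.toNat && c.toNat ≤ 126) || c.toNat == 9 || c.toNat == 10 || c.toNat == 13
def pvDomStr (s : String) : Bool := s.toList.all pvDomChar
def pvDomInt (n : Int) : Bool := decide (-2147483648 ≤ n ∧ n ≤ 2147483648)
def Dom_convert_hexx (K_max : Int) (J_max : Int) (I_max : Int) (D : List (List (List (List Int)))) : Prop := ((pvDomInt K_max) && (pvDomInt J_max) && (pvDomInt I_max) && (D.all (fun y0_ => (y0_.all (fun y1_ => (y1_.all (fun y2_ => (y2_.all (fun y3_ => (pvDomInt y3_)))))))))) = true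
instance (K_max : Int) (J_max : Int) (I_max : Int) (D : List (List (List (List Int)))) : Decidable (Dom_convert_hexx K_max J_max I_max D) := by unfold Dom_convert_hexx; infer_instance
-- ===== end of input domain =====

-- B replaces A's fused triple-nested counting scan by three flat passes (flags, inclusive prefix sums, fill); alternative decomposition, same cost.


-- shared helper: total form of the access D[0][k][j][i]; Pre_ guarantees Python never raises here
def pvDget (D : List (List (List (List Int)))) (k j i : Int) : Int :=
  PySem.List.pyGetD (PySem.List.pyGetD (PySem.List.pyGetD (PySem.List.pyGetD D 0 []) k []) j []) i 0

-- ===== PORT A =====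
def convert_hexx (K_max : Int) (J_max : Int) (I_max : Int) (D : List (List (List (List Int)))) : List Int :=
  -- conv_hexx = [0] * (K_max * J_max * I_max); tmp_conv = 0; triple nested loop with running counter
  (((PySem.List.pyRange 0 K_max 1).foldl (fun s k =>
      (PySem.List.pyRange 0 J_max 1).foldl (fun s j =>
        (PySem.List.pyRange 0 I_max 1).foldl (fun s i =>
          if pvDget D k j i ≠ 0 then
            (PySem.List.pySetD s.1 (k * J_max * I_max + j * I_max + i) (s.2 + 1), s.2 + 1)
          else s) s) s)
    (List.replicate (K_max * J_max * I_max).toNat (0 : Int), (0 : Int)))).1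

-- ===== PORT B =====
def convert_hexx_alt (K_max : Int) (J_max : Int) (I_max : Int) (D : List (List (List (List Int)))) : List Int :=
  -- pass 1: flat 0/1 flags list in linear (k, j, i) order
  let flags := (PySem.List.pyRange 0 K_max 1).flatMap (fun k =>
    (PySem.List.pyRange 0 J_max 1).flatMap (fun j =>
      (PySem.List.pyRange 0 I_max 1).map (fun i =>
        if pvDget D k j i ≠ 0 then (1 : Int) else 0)))
  -- pass 2: inclusive prefix sums (ranks.append(total))
  let ranks := (flags.foldl (fun (p : List Int × Int) f => (p.1 ++ [p.2 + f], p.2 + f)) (([] : List Int), (0 : Int))).1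
  -- pass 3: write each nonzero cell's rank into the preallocated output
  (PySem.List.pyRange 0 (flags.length : Int) 1).foldl (fun out m =>
      if PySem.List.pyGetD flags m 0 ≠ 0 then PySem.List.pySetD out m (PySem.List.pyGetD ranks m 0) else out)
    (List.replicate (K_max * J_max * I_max).toNat (0 : Int))

-- ===== PRECONDITION & SPEC =====
-- Pre_ excludes exactly the inputs on which Python A raises: when all three dimensions are
-- positive, D must be nonempty and D[0] must hold K_max planes of J_max rows of I_max cells
-- (else IndexError); when some dimension is nonpositive (so D is never indexed) but the product
-- K_max*J_max*I_max is huge (two negative dimensions), [0]*(K_max*J_max*I_max) raises MemoryError.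
def Pre_convert_hexx (K_max : Int) (J_max : Int) (I_max : Int) (D : List (List (List (List Int)))) : Prop :=
  ((0 < K_max ∧ 0 < J_max ∧ 0 < I_max) →
    (D ≠ [] ∧ K_max.toNat ≤ D.headI.length ∧
      ∀ pl ∈ D.headI.take K_max.toNat, J_max.toNat ≤ pl.length ∧
        ∀ row ∈ pl.take J_max.toNat, I_max.toNat ≤ row.length)) ∧
  (¬ (0 < K_max ∧ 0 < J_max ∧ 0 < I_max) → K_max * J_max * I_max ≤ 100000000)
instance (K_max : Int) (J_max : Int) (I_max : Int) (D : List (List (List (List Int)))) : Decidable (Pre_convert_hexx K_max J_max I_max D) := by unfold Pre_convert_hexx; infer_instance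

def pvWitness_convert_hexx : Int × Int × Int × List (List (List (List Int))) :=
  (2, 1, 2, [[[[0, 5]], [[3, 0]]]])

def Spec_convert_hexx (K_max : Int) (J_max : Int) (I_max : Int) (D : List (List (List (List Int)))) (out : List Int) : Prop := out = convert_hexx_alt K_max J_max I_max D
instance (K_max : Int) (J_max : Int) (I_max : Int) (D : List (List (List (List Int)))) (out : List Int) : Decidable (Spec_convert_hexx K_max J_max I_max D out) := by unfold Spec_convert_hexx; infer_instance

-- ===== CLAIM (what is proved, stated in full; the proofs are below) =====
def Claim_equal_convert_hexx : Prop := ∀ (K_max : Int) (J_max : Int) (I_max : Int) (D : List (List (List (List Int)))), Dom_convert_hexx K_max J_max I_max D → Pre_convert_hexx K_max J_max I_max D → Spec_convert_hexx K_max J_max I_max D (convert_hexx K_max J_max I_max D)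

-- ===== LEMMAS AND PROOFS =====

-- inclusive prefix sums starting from c (reference form of B's pass 2)
def ranksFrom (c : Int) : List Int → List Int
  | [] => []
  | f :: fs => (c + f) :: ranksFrom (c + f) fs

-- reference result: at each position the inclusive count if the flag is nonzero, else 0
def selMap (c : Int) : List Int → List Int
  | [] => []
  | f :: fs => (if f ≠ 0 then c + f else 0) :: selMap (c + f) fs

-- flat reference loop for A: walk the flags, set position base+t to the incremented counter on a nonzero flag
def loopA (fs : List Int) (base : Nat) (s : List Int × Int) : List Int × Int :=
  match fs with
  | [] => s
  | f :: fs => loopA fs (base + 1) (if f ≠ 0 then (s.1.set base (s.2 + 1), s.2 + 1) else s)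

lemma loopA_append (xs ys : List Int) : ∀ (base : Nat) (s : List Int × Int),
    loopA (xs ++ ys) base s = loopA ys (base + xs.length) (loopA xs base s) := by
  induction xs with
  | nil => intro base s; simp [loopA]
  | cons x xs ih =>
      intro base s
      simp only [List.cons_append, loopA, ih, List.length_cons]
      ring_nf

lemma foldl_eq_loopA_flatMap (body : (List Int × Int) → Nat → (List Int × Int))
    (F : Nat → List Int) (L : Nat)
    (hlen : ∀ t, (F t).length = L)
    (n : Nat) (base : Nat)
    (hbody : ∀ t s, body s t = loopA (F t) (base + t * L) s) :
    ∀ s, (List.range n).foldl body s = loopA ((List.range n).flatMap F) base s := by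
  induction n with
  | zero => intro s; simp [loopA]
  | succ n ih =>
      intro s
      have hflen : ((List.range n).flatMap F).length = n * L := by
        simp only [List.length_flatMap]
        rw [List.map_congr_left (fun t _ => hlen t)]
        simp [List.map_const', mul_comm]
      rw [List.range_succ, List.foldl_append, List.flatMap_append, loopA_append]
      simp only [List.foldl_cons, List.foldl_nil, List.flatMap_cons, List.flatMap_nil,
        List.append_nil, hflen, ih, hbody]

lemma loopA_spec (fs : List Int) : ∀ (pre rest : List Int) (c : Int),
    (∀ f ∈ fs, f = 0 ∨ f = 1) →
    loopA fs pre.length (pre ++ List.replicate fs.length 0 ++ rest, c)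
      = (pre ++ selMap c fs ++ rest, c + fs.sum) := by
  induction fs with
  | nil => intro pre rest c _; simp [loopA, selMap]
  | cons f fs ih =>
      intro pre rest c hf
      have hfs : ∀ g ∈ fs, g = 0 ∨ g = 1 := fun g hg => hf g (List.mem_cons_of_mem _ hg)
      rcases hf f List.mem_cons_self with h0 | h1
      · subst h0
        have h : loopA (0 :: fs) pre.length (pre ++ List.replicate (0 :: fs).length 0 ++ rest, c)
            = loopA fs (pre ++ [(0:Int)]).length ((pre ++ [(0:Int)]) ++ List.replicate fs.length 0 ++ rest, c) := by
          simp [loopA, List.replicate_succ, List.append_assoc]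
        rw [h, ih (pre ++ [(0:Int)]) rest c hfs]
        simp [selMap]
      · subst h1
        have h : loopA (1 :: fs) pre.length (pre ++ List.replicate (1 :: fs).length 0 ++ rest, c)
            = loopA fs (pre ++ [c + 1]).length ((pre ++ [c + 1]) ++ List.replicate fs.length 0 ++ rest, c + 1) := by
          simp [loopA, List.replicate_succ, List.append_assoc]
        rw [h, ih (pre ++ [c + 1]) rest (c + 1) hfs]
        simp [selMap]
        ring_nf

lemma ranks_foldl (fs : List Int) : ∀ (acc : List Int) (c : Int),
    fs.foldl (fun (p : List Int × Int) f => (p.1 ++ [p.2 + f], p.2 + f)) (acc, c)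
      = (acc ++ ranksFrom c fs, c + fs.sum) := by
  induction fs with
  | nil => intro acc c; simp [ranksFrom]
  | cons f fs ih => intro acc c; simp [ranksFrom, ih, List.append_assoc]; ring_nf

lemma bloop (fs : List Int) : ∀ (c : Int) (pre rest : List Int),
    (∀ f ∈ fs, f = 0 ∨ f = 1) →
    (List.range fs.length).foldl
        (fun out m => if fs.getD m 0 ≠ 0 then out.set (pre.length + m) ((ranksFrom c fs).getD m 0) else out)
        (pre ++ List.replicate fs.length 0 ++ rest)
      = pre ++ selMap c fs ++ rest := by
  induction fs with
  | nil => intro c pre rest _; simp [selMap]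
  | cons f fs ih =>
      intro c pre rest hf
      have hfs : ∀ g ∈ fs, g = 0 ∨ g = 1 := fun g hg => hf g (List.mem_cons_of_mem _ hg)
      rw [List.length_cons, List.range_succ_eq_map, List.foldl_cons, List.foldl_map]
      have h0 : (if (f :: fs).getD 0 0 ≠ 0 then
            (pre ++ List.replicate (fs.length + 1) 0 ++ rest).set (pre.length + 0) ((ranksFrom c (f :: fs)).getD 0 0)
          else (pre ++ List.replicate (fs.length + 1) 0 ++ rest))
          = (pre ++ [if f ≠ 0 then c + f else 0]) ++ List.replicate fs.length 0 ++ rest := by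
        by_cases hfz : f = 0
        · subst hfz; simp [List.replicate_succ, List.append_assoc]
        · simp [hfz, ranksFrom, List.replicate_succ, List.append_assoc]
      rw [h0]
      have hcong :
          (List.range fs.length).foldl
            (fun out m => if (f :: fs).getD (m + 1) 0 ≠ 0 then
                out.set (pre.length + (m + 1)) ((ranksFrom c (f :: fs)).getD (m + 1) 0) else out)
            ((pre ++ [if f ≠ 0 then c + f else 0]) ++ List.replicate fs.length 0 ++ rest)
          = (List.range fs.length).foldl
            (fun out m => if fs.getD m 0 ≠ 0 then
                out.set ((pre ++ [if f ≠ 0 then c + f else 0]).length + m) ((ranksFrom (c + f) fs).getD m 0) else out)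
            ((pre ++ [if f ≠ 0 then c + f else 0]) ++ List.replicate fs.length 0 ++ rest) := by
        apply List.foldl_ext
        intro out m _
        have hlen : pre.length + (m + 1) = (pre ++ [if f ≠ 0 then c + f else 0]).length + m := by
          simp; omega
        simp [ranksFrom, hlen]
      rw [hcong, ih (c + f) (pre ++ [if f ≠ 0 then c + f else 0]) rest hfs]
      by_cases hfz : f = 0
      · subst hfz; simp [selMap]
      · simp [selMap, hfz]

lemma main_nonneg (Kn Jn In_ : Nat) (D : List (List (List (List Int)))) :
    convert_hexx (Kn : Int) (Jn : Int) (In_ : Int) D = convert_hexx_alt (Kn : Int) (Jn : Int) (In_ : Int) D := by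
  set flag : Nat → Nat → Nat → Int :=
    fun k j i => if pvDget D (k : Int) (j : Int) (i : Int) ≠ 0 then (1 : Int) else 0 with hflag
  set F2 : Nat → Nat → List Int := fun k j => (List.range In_).map (flag k j) with hF2
  set F1 : Nat → List Int := fun k => (List.range Jn).flatMap (F2 k) with hF1
  set flagsN : List Int := (List.range Kn).flatMap F1 with hflagsN
  have hmem : ∀ f ∈ flagsN, f = 0 ∨ f = 1 := by
    intro f hf
    simp only [hflagsN, hF1, hF2, hflag, List.mem_flatMap, List.mem_map] at hf
    obtain ⟨k, -, j, -, i, -, hfe⟩ := hf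
    split at hfe
    · right; omega
    · left; omega
  have hlen2 : ∀ k, (F1 k).length = Jn * In_ := by
    intro k
    simp [hF1, hF2, List.length_flatMap, List.map_const', List.sum_replicate, smul_eq_mul]
  have hlentot : flagsN.length = Kn * (Jn * In_) := by
    simp only [hflagsN, List.length_flatMap]
    rw [List.map_congr_left (fun k _ => hlen2 k)]
    simp [List.map_const', List.sum_replicate]
  have hinit : ((Kn : Int) * (Jn : Int) * (In_ : Int)).toNat = flagsN.length := by
    rw [hlentot]
    have : ((Kn : Int) * (Jn : Int) * (In_ : Int)) = ((Kn * (Jn * In_) : Nat) : Int) := by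
      push_cast; ring
    rw [this, Int.toNat_natCast]
  -- innermost level: the i-loop of A is loopA over one row of flags
  have hbodyI : ∀ (k j : Nat) (i : Nat) (s : List Int × Int),
      (fun (s : List Int × Int) (i : Nat) =>
        if pvDget D (k : Int) (j : Int) (i : Int) ≠ 0 then
          (PySem.List.pySetD s.1 ((k : Int) * (Jn : Int) * (In_ : Int) + (j : Int) * (In_ : Int) + (i : Int)) (s.2 + 1), s.2 + 1)
        else s) s i
      = loopA [flag k j i] ((k * (Jn * In_) + j * In_) + i * 1) s := by
    intro k j i s
    by_cases hc : pvDget D (k : Int) (j : Int) (i : Int) = 0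
    · simp [loopA, hflag, hc]
    · have hidx : ((k : Int) * (Jn : Int) * (In_ : Int) + (j : Int) * (In_ : Int) + (i : Int))
          = (((k * (Jn * In_) + j * In_) + i * 1 : Nat) : Int) := by push_cast; ring
      show (if pvDget D (k : Int) (j : Int) (i : Int) ≠ 0 then
          (PySem.List.pySetD _ ((k : Int) * (Jn : Int) * (In_ : Int) + (j : Int) * (In_ : Int) + (i : Int)) _, _)
        else _) = _
      rw [if_pos hc, hidx, PySem.List.pySetD_natCast]
      simp [loopA, hflag, hc]
  have hbodyJ : ∀ (k : Nat) (j : Nat) (s : List Int × Int),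
      (List.range In_).foldl
        (fun (s : List Int × Int) (i : Nat) =>
          if pvDget D (k : Int) (j : Int) (i : Int) ≠ 0 then
            (PySem.List.pySetD s.1 ((k : Int) * (Jn : Int) * (In_ : Int) + (j : Int) * (In_ : Int) + (i : Int)) (s.2 + 1), s.2 + 1)
          else s) s
      = loopA (F2 k j) (k * (Jn * In_) + j * In_) s := by
    intro k j s
    rw [foldl_eq_loopA_flatMap _ (fun i => [flag k j i]) 1 (fun t => rfl) In_ (k * (Jn * In_) + j * In_) (hbodyI k j) s]
    rw [show (fun i => [flag k j i]) = (pure ∘ flag k j) from rfl,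
      List.flatMap_pure_eq_map (flag k j) (List.range In_)]
  have hbodyK : ∀ (k : Nat) (s : List Int × Int),
      (List.range Jn).foldl
        (fun (s : List Int × Int) (j : Nat) =>
          (List.range In_).foldl
            (fun (s : List Int × Int) (i : Nat) =>
              if pvDget D (k : Int) (j : Int) (i : Int) ≠ 0 then
                (PySem.List.pySetD s.1 ((k : Int) * (Jn : Int) * (In_ : Int) + (j : Int) * (In_ : Int) + (i : Int)) (s.2 + 1), s.2 + 1)
              else s) s) s
      = loopA (F1 k) (0 + k * (Jn * In_)) s := by
    intro k s
    rw [foldl_eq_loopA_flatMap _ (F2 k) In_ (fun j => by simp [hF2]) Jn (k * (Jn * In_))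
      (fun j s => by rw [hbodyJ k j s]) s]
    rw [hF1, Nat.zero_add]
  have hA : convert_hexx (Kn : Int) (Jn : Int) (In_ : Int) D
      = (loopA flagsN 0 (List.replicate flagsN.length (0 : Int), 0)).1 := by
    unfold convert_hexx
    simp only [PySem.List.pyRange_zero_natCast, List.foldl_map]
    rw [hinit]
    rw [foldl_eq_loopA_flatMap _ F1 (Jn * In_) hlen2 Kn 0 hbodyK
      (List.replicate flagsN.length (0 : Int), 0)]
    try rw [← hflagsN]
  have hAsel : convert_hexx (Kn : Int) (Jn : Int) (In_ : Int) D = selMap 0 flagsN := by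
    rw [hA]
    have h := congrArg Prod.fst (loopA_spec flagsN [] [] 0 hmem)
    simpa using h
  -- B side
  have hBflags :
      (PySem.List.pyRange 0 (Kn : Int) 1).flatMap (fun k =>
        (PySem.List.pyRange 0 (Jn : Int) 1).flatMap (fun j =>
          (PySem.List.pyRange 0 (In_ : Int) 1).map (fun i =>
            if pvDget D k j i ≠ 0 then (1 : Int) else 0))) = flagsN := by
    simp only [PySem.List.pyRange_zero_natCast, List.flatMap_map, List.map_map]
    rw [hflagsN, hF1, hF2, hflag]
    rfl
  have hB : convert_hexx_alt (Kn : Int) (Jn : Int) (In_ : Int) D = selMap 0 flagsN := by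
    unfold convert_hexx_alt
    simp only [hBflags]
    rw [ranks_foldl flagsN [] 0]
    simp only [List.nil_append]
    rw [hinit, PySem.List.pyRange_zero_natCast, List.foldl_map]
    simp only [PySem.List.pyGetD_natCast, PySem.List.pySetD_natCast]
    have hcong := List.foldl_ext
      (l := List.range flagsN.length)
      (f := fun (out : List Int) (m : Nat) =>
        if flagsN.getD m 0 ≠ 0 then out.set m ((ranksFrom 0 flagsN).getD m 0) else out)
      (g := fun (out : List Int) (m : Nat) =>
        if flagsN.getD m 0 ≠ 0 then out.set (List.length ([] : List Int) + m) ((ranksFrom 0 flagsN).getD m 0) else out)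
      (a := List.replicate flagsN.length (0 : Int))
      (by intro out m _; simp)
    rw [hcong]
    have h := bloop flagsN 0 [] [] hmem
    simpa using h
  rw [hAsel, hB]

lemma main_neg (K_max J_max I_max : Int) (D : List (List (List (List Int))))
    (h : K_max < 0 ∨ J_max < 0 ∨ I_max < 0) :
    convert_hexx K_max J_max I_max D = convert_hexx_alt K_max J_max I_max D := by
  have hempty : (PySem.List.pyRange 0 K_max 1).flatMap (fun k =>
      (PySem.List.pyRange 0 J_max 1).flatMap (fun j =>
        (PySem.List.pyRange 0 I_max 1).map (fun i =>
          if pvDget D k j i ≠ 0 then (1 : Int) else 0))) = [] := by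
    rcases h with h | h | h
    · rw [PySem.List.pyRange_one_eq_nil (show K_max ≤ 0 by omega)]; try rfl
    · simp [PySem.List.pyRange_one_eq_nil (show J_max ≤ 0 by omega)]
    · simp [PySem.List.pyRange_one_eq_nil (show I_max ≤ 0 by omega)]
  have hA : convert_hexx K_max J_max I_max D
      = List.replicate (K_max * J_max * I_max).toNat (0 : Int) := by
    unfold convert_hexx
    rcases h with h | h | h
    · rw [PySem.List.pyRange_one_eq_nil (show K_max ≤ 0 by omega)]; try rfl
    · simp [PySem.List.pyRange_one_eq_nil (show J_max ≤ 0 by omega), List.foldl_fixed]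
    · simp [PySem.List.pyRange_one_eq_nil (show I_max ≤ 0 by omega), List.foldl_fixed]
  have hB : convert_hexx_alt K_max J_max I_max D
      = List.replicate (K_max * J_max * I_max).toNat (0 : Int) := by
    unfold convert_hexx_alt
    simp only [hempty, List.foldl_nil, List.length_nil, Nat.cast_zero]
    rw [PySem.List.pyRange_one_eq_nil (le_refl (0 : Int))]
    try rfl
  rw [hA, hB]

-- ===== VERDICT (by name: the statement is the Claim_ definition above) =====
theorem convert_hexx_spec : Claim_equal_convert_hexx := by
  intro K_max J_max I_max D _ _
  unfold Spec_convert_hexx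
  by_cases hK : 0 ≤ K_max
  · by_cases hJ : 0 ≤ J_max
    · by_cases hI : 0 ≤ I_max
      · obtain ⟨Kn, rfl⟩ : ∃ n : Nat, K_max = (n : Int) := ⟨K_max.toNat, (Int.toNat_of_nonneg hK).symm⟩
        obtain ⟨Jn, rfl⟩ : ∃ n : Nat, J_max = (n : Int) := ⟨J_max.toNat, (Int.toNat_of_nonneg hJ).symm⟩
        obtain ⟨In_, rfl⟩ : ∃ n : Nat, I_max = (n : Int) := ⟨I_max.toNat, (Int.toNat_of_nonneg hI).symm⟩
        exact main_nonneg Kn Jn In_ D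
      · exact main_neg _ _ _ _ (Or.inr (Or.inr (by omega)))
    · exact main_neg _ _ _ _ (Or.inr (Or.inl (by omega)))
  · exact main_neg _ _ _ _ (Or.inl (by omega))
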